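-- pv_equiv track=rewrite | github.com/astral451/AdventOfCode | 2022/day8/elf_tree_house.py | check_horizontal_values
-- ===== SOURCE A (Python) =====
-- def check_horizontal_values(tree_data, h_range, w_range, h_idx, w_idx):
--     """
--     A complete copy of _vertical_ version.  I really don't like this and want
--     to genericize it.  All I'm doing is swapping which element I loop over
--     """
--
--     tree_height = tree_data[h_idx][w_idx]
--     neg_vis = True
--     pos_vis = True
--     visiblilty = []
--     for w in w_range:
--         if w == w_idx:
--             visiblilty.append(-1) # this is THE tree
--         else:
--             if tree_data[h_idx][w] >= tree_height:
--                 visiblilty.append(0)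
--                 if w <= w_idx:
--                     neg_vis = False
--                 else:
--                     pos_vis = False
--             else:
--                 visiblilty.append(1)
--
--     return visiblilty, neg_vis, pos_vis
-- ===== SOURCE B (Python) =====
-- def check_horizontal_values(tree_data, h_range, w_range, h_idx, w_idx):
--     row = tree_data[h_idx]
--     tree_height = row[w_idx]
--     ws = list(w_range)
--     visibility = [-1 if w == w_idx else (0 if row[w] >= tree_height else 1)
--                   for w in ws]
--     neg_vis = not any(row[w] >= tree_height for w in ws if w < w_idx)
--     pos_vis = not any(row[w] >= tree_height for w in ws if w > w_idx)
--     return visibility, neg_vis, pos_vis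
-- ===== Notes on version B (the rewrite author's own statement) =====
-- stated objective: idiomatic
-- what changed: Replaces the single stateful loop that interleaves list-building and flag-mutation with a declarative decomposition: one comprehension builds the visibility list and two independent any()-scans compute the directional flags.
import Mathlib
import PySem

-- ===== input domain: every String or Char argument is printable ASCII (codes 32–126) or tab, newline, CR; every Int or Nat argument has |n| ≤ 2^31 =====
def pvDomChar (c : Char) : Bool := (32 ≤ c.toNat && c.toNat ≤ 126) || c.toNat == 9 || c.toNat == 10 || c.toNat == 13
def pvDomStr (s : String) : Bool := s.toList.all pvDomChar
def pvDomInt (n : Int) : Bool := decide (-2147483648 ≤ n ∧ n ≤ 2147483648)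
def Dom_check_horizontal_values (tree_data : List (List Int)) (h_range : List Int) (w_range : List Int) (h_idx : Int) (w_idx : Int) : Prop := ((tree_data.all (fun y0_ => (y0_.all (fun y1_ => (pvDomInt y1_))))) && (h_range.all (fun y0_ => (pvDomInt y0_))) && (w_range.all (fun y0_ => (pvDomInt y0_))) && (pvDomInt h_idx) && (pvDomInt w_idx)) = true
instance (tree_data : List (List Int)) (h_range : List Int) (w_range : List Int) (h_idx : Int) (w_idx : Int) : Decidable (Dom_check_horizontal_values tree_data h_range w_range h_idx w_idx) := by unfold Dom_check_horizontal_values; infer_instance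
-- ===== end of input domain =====

-- B replaces A's single stateful loop by a declarative decomposition: one map for
-- the visibility list and two independent any-scans for the directional flags (idiomatic).

-- ===== PORT A =====
-- A's single for-loop over w_range carrying (visibility, neg_vis, pos_vis).
-- Indexing tree_data[h_idx][w] is pyGet? with default 0/[]; Pre_ guarantees it succeeds.
def chvLoopA (row : List Int) (tree_height : Int) (w_idx : Int) :
    List Int → List Int → Bool → Bool → List Int × Bool × Bool
  | [], vis, neg, pos => (vis, neg, pos)
  | w :: ws, vis, neg, pos =>
    if w = w_idx then
      chvLoopA row tree_height w_idx ws (vis ++ [-1]) neg pos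
    else
      if (PySem.List.pyGet? row w).getD 0 ≥ tree_height then
        if w ≤ w_idx then
          chvLoopA row tree_height w_idx ws (vis ++ [0]) false pos
        else
          chvLoopA row tree_height w_idx ws (vis ++ [0]) neg false
      else
        chvLoopA row tree_height w_idx ws (vis ++ [1]) neg pos

def check_horizontal_values (tree_data : List (List Int)) (h_range : List Int) (w_range : List Int) (h_idx : Int) (w_idx : Int) : List Int × Bool × Bool :=
  let row := (PySem.List.pyGet? tree_data h_idx).getD []
  let tree_height := (PySem.List.pyGet? row w_idx).getD 0
  chvLoopA row tree_height w_idx w_range [] true true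

-- ===== PORT B =====
def check_horizontal_values_alt (tree_data : List (List Int)) (h_range : List Int) (w_range : List Int) (h_idx : Int) (w_idx : Int) : List Int × Bool × Bool :=
  let row := (PySem.List.pyGet? tree_data h_idx).getD []
  let tree_height := (PySem.List.pyGet? row w_idx).getD 0
  let visibility := w_range.map (fun w =>
    if w = w_idx then (-1 : Int)
    else if (PySem.List.pyGet? row w).getD 0 ≥ tree_height then 0 else 1)
  let neg_vis := !(w_range.any (fun w =>
    w < w_idx && (PySem.List.pyGet? row w).getD 0 ≥ tree_height))
  let pos_vis := !(w_range.any (fun w =>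
    w > w_idx && (PySem.List.pyGet? row w).getD 0 ≥ tree_height))
  (visibility, neg_vis, pos_vis)

-- ===== PRECONDITION & SPEC =====
-- Pre_ = exactly the inputs where Python A returns (no IndexError): h_idx indexes
-- tree_data, w_idx indexes that row, and every w in w_range other than w_idx indexes it.
def Pre_check_horizontal_values (tree_data : List (List Int)) (h_range : List Int) (w_range : List Int) (h_idx : Int) (w_idx : Int) : Prop :=
  PySem.Raise.InRange tree_data.length h_idx ∧
  PySem.Raise.InRange ((PySem.List.pyGet? tree_data h_idx).getD []).length w_idx ∧
  ∀ w ∈ w_range, w ≠ w_idx → PySem.Raise.InRange ((PySem.List.pyGet? tree_data h_idx).getD []).length w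
instance (tree_data : List (List Int)) (h_range : List Int) (w_range : List Int) (h_idx : Int) (w_idx : Int) : Decidable (Pre_check_horizontal_values tree_data h_range w_range h_idx w_idx) := by unfold Pre_check_horizontal_values; infer_instance

def pvWitness_check_horizontal_values : List (List Int) × List Int × List Int × Int × Int :=
  ([[3, 1, 4]], [0], [0, 1, 2], 0, 1)

def Spec_check_horizontal_values (tree_data : List (List Int)) (h_range : List Int) (w_range : List Int) (h_idx : Int) (w_idx : Int) (out : List Int × Bool × Bool) : Prop := out = check_horizontal_values_alt tree_data h_range w_range h_idx w_idx
instance (tree_data : List (List Int)) (h_range : List Int) (w_range : List Int) (h_idx : Int) (w_idx : Int) (out : List Int × Bool × Bool) : Decidable (Spec_check_horizontal_values tree_data h_range w_range h_idx w_idx out) := by unfold Spec_check_horizontal_values; infer_instance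

-- ===== CLAIM (what is proved, stated in full; the proofs are below) =====
def Claim_equal_check_horizontal_values : Prop := ∀ (tree_data : List (List Int)) (h_range : List Int) (w_range : List Int) (h_idx : Int) (w_idx : Int), Dom_check_horizontal_values tree_data h_range w_range h_idx w_idx → Pre_check_horizontal_values tree_data h_range w_range h_idx w_idx → Spec_check_horizontal_values tree_data h_range w_range h_idx w_idx (check_horizontal_values tree_data h_range w_range h_idx w_idx)

-- ===== LEMMAS AND PROOFS =====

-- A's loop with accumulator (vis, neg, pos) equals vis ++ map plus flag conjunctions.
theorem chvLoopA_eq (row : List Int) (h w_idx : Int) (ws vis : List Int) (neg pos : Bool) :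
    chvLoopA row h w_idx ws vis neg pos =
      (vis ++ ws.map (fun w =>
          if w = w_idx then (-1 : Int)
          else if (PySem.List.pyGet? row w).getD 0 ≥ h then 0 else 1),
       neg && !(ws.any (fun w => w < w_idx && (PySem.List.pyGet? row w).getD 0 ≥ h)),
       pos && !(ws.any (fun w => w > w_idx && (PySem.List.pyGet? row w).getD 0 ≥ h))) := by
  induction ws generalizing vis neg pos with
  | nil => simp [chvLoopA]
  | cons w ws ih =>
    by_cases hw : w = w_idx
    · subst hw
      simp [chvLoopA, ih, List.any_cons]
    · by_cases hb : (PySem.List.pyGet? row w).getD 0 ≥ h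
      · by_cases hle : w ≤ w_idx
        · have hlt : w < w_idx := lt_of_le_of_ne hle hw
          simp [chvLoopA, hw, hb, hle, ih, List.any_cons, hlt, not_lt_of_ge hle]
        · have hgt : w_idx < w := lt_of_not_ge hle
          simp [chvLoopA, hw, hb, hle, ih, List.any_cons, hgt, not_lt_of_ge (le_of_lt hgt)]
      · simp [chvLoopA, hw, hb, ih, List.any_cons]

-- ===== VERDICT (by name: the statement is the Claim_ definition above) =====
theorem check_horizontal_values_spec : Claim_equal_check_horizontal_values := by
  intro tree_data h_range w_range h_idx w_idx _ _
  unfold Spec_check_horizontal_values check_horizontal_values check_horizontal_values_alt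
  simp [chvLoopA_eq]
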